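-- pv_equiv track=rewrite | github.com/TopMaths/Motzkin | Motzkin.py | isMotzkin
-- ===== SOURCE A (Python) =====
-- def isMotzkin(s):
--     """vérifie que s est bien un code de Motzkin"""
--     if type(s)!= type([]) and type(s)!= type(()): return False
--     Som=0
--     for i in s:
--         # s ne peut contenir que les entiers -1,0,1
--         if type (i)!=type(1) or abs(i)>1: return False
--         Som+=i
--         # si Som<0 : le chemin correspondant passe sous l'axe des abscisses
--         if Som<0: return False
--     #si Som>0 le point d'arrivée du chemin n'est pas sur l'axe des abscisses
--     return Som==0
-- ===== SOURCE B (Python) =====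
-- from itertools import accumulate
--
-- def isMotzkin(s):
--     if type(s) != type([]) and type(s) != type(()):
--         return False
--     if not all(type(i) == type(1) and abs(i) <= 1 for i in s):
--         return False
--     if not s:
--         return True
--     ps = list(accumulate(s))
--     return min(ps) >= 0 and ps[-1] == 0
-- ===== Notes on version B (the rewrite author's own statement) =====
-- stated objective: alternative
-- what changed: A validates elements and checks nonnegativity of the running sum incrementally with early returns inside one loop; B first validates all elements in one all() pass, then materializes the prefix-sum sequence with itertools.accumulate and decides by min(prefix sums) >= 0 and last prefix sum == 0.
import Mathlib
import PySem

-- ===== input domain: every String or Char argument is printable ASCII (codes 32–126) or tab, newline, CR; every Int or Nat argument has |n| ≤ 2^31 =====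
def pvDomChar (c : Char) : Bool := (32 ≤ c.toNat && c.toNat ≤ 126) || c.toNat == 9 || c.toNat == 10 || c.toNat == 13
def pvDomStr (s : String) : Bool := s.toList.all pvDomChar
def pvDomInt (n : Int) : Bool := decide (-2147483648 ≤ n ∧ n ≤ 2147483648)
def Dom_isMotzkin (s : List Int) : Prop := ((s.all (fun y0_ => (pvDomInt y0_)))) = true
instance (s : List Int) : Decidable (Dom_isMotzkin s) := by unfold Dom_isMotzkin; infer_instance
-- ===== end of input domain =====

-- B replaces A's incremental running-sum loop by an element validity pass plus materialized
-- prefix sums judged via min/last (alternative decomposition, same cost).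


-- ===== PORT A =====
-- the loop: Som accumulated, each element checked, early False on bad element or Som<0
def isMotzkinGo (som : Int) : List Int → Bool
  | [] => som == 0
  | i :: r =>
    if |i| > 1 then false
    else if som + i < 0 then false
    else isMotzkinGo (som + i) r

-- the 'type(s) != list/tuple' guard is vacuous under the List Int type and has no port
def isMotzkin (s : List Int) : Bool := isMotzkinGo 0 s

-- ===== PORT B =====
-- itertools.accumulate(s): running sums starting at s[0]
def pvAccum (t : Int) : List Int → List Int
  | [] => []
  | i :: r => (t + i) :: pvAccum (t + i) r

def isMotzkin_alt (s : List Int) : Bool :=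
  if !(s.all fun i => decide (|i| ≤ 1)) then false
  else if s.isEmpty then true
  else
    let ps := pvAccum 0 s
    match PySem.List.min? ps (fun x => x), ps.getLast? with
    | some m, some l => decide (0 ≤ m) && (l == 0)
    | _, _ => false

-- ===== PRECONDITION & SPEC =====
def Spec_isMotzkin (s : List Int) (out : Bool) : Prop := out = isMotzkin_alt s
instance (s : List Int) (out : Bool) : Decidable (Spec_isMotzkin s out) := by unfold Spec_isMotzkin; infer_instance

-- ===== CLAIM (what is proved, stated in full; the proofs are below) =====
def Claim_equal_isMotzkin : Prop := ∀ (s : List Int), Dom_isMotzkin s → Spec_isMotzkin s (isMotzkin s)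

-- ===== LEMMAS AND PROOFS =====

theorem pvAccum_getLast? (s : List Int) (t : Int) (h : s ≠ []) :
    (pvAccum t s).getLast? = some (t + s.sum) := by
  induction s generalizing t with
  | nil => exact absurd rfl h
  | cons i r ih =>
    cases r with
    | nil => simp [pvAccum]
    | cons j q =>
      have h2 := ih (t + i) (by simp)
      simp only [pvAccum] at h2 ⊢
      rw [List.getLast?_cons_cons, h2]
      congr 1
      simp
      ring

theorem go_characterization (s : List Int) (som : Int) :
    isMotzkinGo som s =
      ((s.all fun i => decide (|i| ≤ 1)) &&
       ((pvAccum som s).all fun t => decide (0 ≤ t)) &&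
       (som + s.sum == 0)) := by
  induction s generalizing som with
  | nil => simp [isMotzkinGo, pvAccum]
  | cons i r ih =>
    by_cases h1 : |i| > 1
    · simp [isMotzkinGo, h1]
    · by_cases h2 : som + i < 0
      · simp [isMotzkinGo, pvAccum, h1, h2]
      · simp only [isMotzkinGo, h1, h2, if_false, ih, pvAccum, List.all_cons,
          List.sum_cons]
        have e1 : decide (|i| ≤ 1) = true := by simp; omega
        have e2 : decide (0 ≤ som + i) = true := by simp; omega
        have e3 : som + (i + r.sum) = som + i + r.sum := by ring
        rw [e1, e2, e3]
        simp [Bool.and_assoc]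

theorem min_part (ps : List Int) (h : ps ≠ []) :
    (match PySem.List.min? ps (fun x => x), ps.getLast? with
     | some m, some l => decide (0 ≤ m) && (l == 0)
     | _, _ => false) =
    ((ps.all fun t => decide (0 ≤ t)) && (ps.getLast?.getD 0 == 0)) := by
  obtain ⟨m, hm⟩ : ∃ m, PySem.List.min? ps (fun x => x) = some m := by
    cases hmm : PySem.List.min? ps (fun x => x) with
    | none => exact absurd ((PySem.List.min?_eq_none_iff ps (fun x => x)).mp hmm) h
    | some m => exact ⟨m, rfl⟩
  obtain ⟨l, hl⟩ : ∃ l, ps.getLast? = some l := by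
    cases hll : ps.getLast? with
    | none => exact absurd (List.getLast?_eq_none_iff.mp hll) h
    | some l => exact ⟨l, rfl⟩
  rw [hm, hl]
  have hmem := PySem.List.min?_mem hm
  have hmin := PySem.List.min?_isMin hm
  have : decide (0 ≤ m) = (ps.all fun t => decide (0 ≤ t)) := by
    by_cases h0 : 0 ≤ m
    · have h3 : ∀ t ∈ ps, (0:Int) ≤ t := fun t ht => le_trans h0 (hmin t ht)
      simp [h0]
      exact h3
    · simp [h0]
      exact ⟨m, hmem, by omega⟩
  show (decide (0 ≤ m) && (l == 0)) = _
  rw [this]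
  simp

-- ===== VERDICT (by name: the statement is the Claim_ definition above) =====
theorem isMotzkin_spec : Claim_equal_isMotzkin := by
  intro s _
  unfold Spec_isMotzkin isMotzkin isMotzkin_alt
  rw [go_characterization]
  by_cases hall : (s.all fun i => decide (|i| ≤ 1)) = true
  · cases hs : s with
    | nil => subst hs; simp [pvAccum]
    | cons i r =>
      have hne : s ≠ [] := by rw [hs]; simp
      rw [← hs]
      have hne' : pvAccum 0 s ≠ [] := by
        rw [hs]; simp [pvAccum]
      simp only [hall, Bool.not_true, Bool.false_eq_true, if_false,
        List.isEmpty_iff, hne, if_false]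
      rw [min_part _ hne', pvAccum_getLast? s 0 hne]
      simp
  · simp [hall]
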